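-- pv_equiv track=rewrite | github.com/shivamkumar0611/problem-solutions | level2/Problem a : ‘Lovely Lucky Lambs’/solution1.py | solution
-- ===== SOURCE A (Python) =====
-- def solution(total_lambs):
--     # Your code here
--     maxlist=[]
--     i=0
--     henchmen=0
--     while i<= total_lambs:
--         currentvalue=2**i
--         maxlist.append(currentvalue)
--         henchmen=henchmen + currentvalue
--         if henchmen > total_lambs:
--             break
--         i=i+1
--
--     lambs=[1,1]
--     fibhenchmen=2
--     y=2
--     while y<= total_lambs:
--         value=lambs[y-1] + lambs[y-2]
--         lambs.append(value)
--         fibhenchmen=fibhenchmen + int(lambs[y])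
--         if fibhenchmen > total_lambs:
--             break
--         y=y+1
--
--     answer = len(lambs) - len(maxlist)
--
--     return abs(answer)
-- ===== SOURCE B (Python) =====
-- def solution(total_lambs):
--     # max henchmen count: greedy powers of two; closed form via bit_length
--     if total_lambs < 0:
--         max_count = 0
--     else:
--         max_count = (total_lambs + 1).bit_length()
--     # stingy (Fibonacci) count: O(1) state, no list
--     a, b, s, fib_count = 1, 1, 2, 2
--     while s <= total_lambs:
--         a, b = b, a + b
--         s += b
--         fib_count += 1
--     return abs(fib_count - max_count)
-- ===== Notes on version B (the rewrite author's own statement) =====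
-- stated objective: simpler
-- what changed: The powers-of-two while-loop (which builds a list and recomputes 2**i each step) is replaced by the closed form (total_lambs+1).bit_length(), and the Fibonacci loop keeps only two running terms, a running sum and a counter instead of building and indexing a list.
import Mathlib
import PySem

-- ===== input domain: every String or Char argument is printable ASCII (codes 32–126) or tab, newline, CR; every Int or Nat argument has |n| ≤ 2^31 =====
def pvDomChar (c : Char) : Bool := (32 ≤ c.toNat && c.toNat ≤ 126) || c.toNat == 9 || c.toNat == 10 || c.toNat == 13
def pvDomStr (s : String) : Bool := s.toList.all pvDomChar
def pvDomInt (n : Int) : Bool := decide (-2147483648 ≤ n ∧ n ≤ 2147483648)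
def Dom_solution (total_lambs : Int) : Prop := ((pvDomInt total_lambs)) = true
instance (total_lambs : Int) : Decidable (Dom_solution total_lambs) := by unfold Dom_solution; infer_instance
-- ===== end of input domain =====

-- B replaces A's list-building powers-of-two loop by a bit_length closed form and A's
-- list-building Fibonacci loop by an O(1)-state loop (two terms + running sum + counter).

-- ===== PORT A =====

-- first while-loop of A; i ≥ 0 throughout, so Python's 2**i is exactly 2 ^ i.toNat
def solLoop1 (total : Int) (maxlist : List Int) (i henchmen : Int) : List Int :=
  if _h : i ≤ total then
    let currentvalue : Int := 2 ^ i.toNat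
    let ml := maxlist ++ [currentvalue]
    let h' := henchmen + currentvalue
    if h' > total then ml else solLoop1 total ml (i + 1) h'
  else maxlist
termination_by (total + 1 - i).toNat
decreasing_by omega

-- second while-loop of A; the indices y-1, y-2, y are always in range in Python
-- (lambs has length y at entry, y+1 after the append), so .getD 0 is exact here
def solLoop2 (total : Int) (lambs : List Int) (fibhenchmen y : Int) : List Int :=
  if _h : y ≤ total then
    let value := (PySem.List.pyGet? lambs (y - 1)).getD 0 + (PySem.List.pyGet? lambs (y - 2)).getD 0
    let l' := lambs ++ [value]
    let fh' := fibhenchmen + (PySem.List.pyGet? l' y).getD 0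
    if fh' > total then l' else solLoop2 total l' fh' (y + 1)
  else lambs
termination_by (total + 1 - y).toNat
decreasing_by omega

def solution (total_lambs : Int) : Int :=
  let maxlist := solLoop1 total_lambs [] 0 0
  let lambs := solLoop2 total_lambs [1, 1] 2 2
  let answer : Int := (lambs.length : Int) - (maxlist.length : Int)
  |answer|

-- ===== PORT B =====

-- Python's int.bit_length for n ≥ 0 (0 → 0, n ≥ 1 → 1 + bit_length(n >> 1))
def bitLen (n : Int) : Int :=
  if _h : n ≤ 0 then 0 else bitLen (n / 2) + 1
termination_by n.toNat
decreasing_by omega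

-- B's while-loop: the positivity proof arguments only justify termination (s strictly grows)
def fibLoop (total a b s cnt : Int) (ha : 1 ≤ a) (hb : 1 ≤ b) : Int :=
  if _h : s ≤ total then
    fibLoop total b (a + b) (s + (a + b)) (cnt + 1) hb (by omega)
  else cnt
termination_by (total + 1 - s).toNat
decreasing_by omega

def solution_alt (total_lambs : Int) : Int :=
  let max_count : Int := if total_lambs < 0 then 0 else bitLen (total_lambs + 1)
  let fib_count : Int := fibLoop total_lambs 1 1 2 2 (by omega) (by omega)
  |fib_count - max_count|

-- ===== PRECONDITION & SPEC =====
def Spec_solution (total_lambs : Int) (out : Int) : Prop := out = solution_alt total_lambs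
instance (total_lambs : Int) (out : Int) : Decidable (Spec_solution total_lambs out) := by unfold Spec_solution; infer_instance

-- ===== CLAIM (what is proved, stated in full; the proofs are below) =====
def Claim_equal_solution : Prop := ∀ (total_lambs : Int), Dom_solution total_lambs → Spec_solution total_lambs (solution total_lambs)

-- ===== LEMMAS AND PROOFS =====

-- bit_length characterisation: 2^k ≤ n < 2^(k+1) → bitLen n = k+1
theorem bitLen_eq (k : Nat) : ∀ n : Int, (2 : Int) ^ k ≤ n → n < 2 ^ (k + 1) → bitLen n = k + 1 := by
  induction k with
  | zero =>
    intro n h1 h2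
    have : n = 1 := by omega
    subst this
    rw [bitLen, dif_neg (by omega)]
    norm_num
    rw [bitLen, dif_pos (by omega)]
  | succ k ih =>
    intro n h1 h2
    have hp : (0 : Int) < 2 ^ (k + 1) := by positivity
    rw [bitLen, dif_neg (by omega)]
    have h1' : (2 : Int) ^ k ≤ n / 2 := by
      have : (2 : Int) ^ (k + 1) = 2 * 2 ^ k := by ring
      omega
    have h2' : n / 2 < 2 ^ (k + 1) := by
      have : (2 : Int) ^ (k + 2) = 2 * 2 ^ (k + 1) := by ring
      omega
    rw [ih (n / 2) h1' h2']
    push_cast; ring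

-- A's first loop, related to bitLen: started at i with henchmen = 2^i - 1 ≤ total
theorem solLoop1_len (total : Int) : ∀ fuel : Nat, ∀ (ml : List Int) (i : Int), 0 ≤ i →
    (2 : Int) ^ i.toNat - 1 ≤ total → fuel = (total + 1 - i).toNat →
    ((solLoop1 total ml i (2 ^ i.toNat - 1)).length : Int)
      = (ml.length : Int) + bitLen (total + 1) - i := by
  intro fuel
  induction fuel using Nat.strong_induction_on with
  | _ fuel ih =>
    intro ml i hi hle hfuel
    have hibound : i ≤ (2 : Int) ^ i.toNat - 1 := by
      have h1 := Nat.lt_two_pow_self (n := i.toNat)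
      have h2 : (((2:Nat) ^ i.toNat : Nat) : Int) = (2:Int) ^ i.toNat := by push_cast; ring
      omega
    have hguard : i ≤ total := le_trans hibound hle
    rw [solLoop1, dif_pos hguard]
    have hstep : (2 : Int) ^ i.toNat - 1 + 2 ^ i.toNat = 2 ^ (i + 1).toNat - 1 := by
      have : (i + 1).toNat = i.toNat + 1 := by omega
      rw [this]; ring
    by_cases hbrk : (2 : Int) ^ i.toNat - 1 + 2 ^ i.toNat > total
    · rw [if_pos hbrk]
      have hbl : bitLen (total + 1) = (i.toNat : Int) + 1 := by
        apply bitLen_eq i.toNat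
        · omega
        · have : (2 : Int) ^ (i.toNat + 1) = 2 * 2 ^ i.toNat := by ring
          omega
      rw [hbl]
      simp only [List.length_append, List.length_cons, List.length_nil]
      push_cast
      omega
    · rw [if_neg hbrk]
      have hle' : (2 : Int) ^ (i + 1).toNat - 1 ≤ total := by omega
      have := ih ((total + 1 - (i + 1)).toNat) (by omega) (ml ++ [2 ^ i.toNat]) (i + 1)
        (by omega) hle' rfl
      rw [hstep] at *
      rw [this]
      simp only [List.length_append, List.length_cons, List.length_nil]
      push_cast
      omega

-- A's second loop in lockstep with B's fibLoop.
-- invariants: lambs has length y, its last two elements are a, b; fibhenchmen = s;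
-- cnt = y; 2 ≤ y; s ≤ total (the loop was entered / not yet broken); s ≥ 2y - 2.
theorem solLoop2_len (total : Int) : ∀ fuel : Nat, ∀ (lambs : List Int) (s y a b : Int)
    (ha : 1 ≤ a) (hb : 1 ≤ b), lambs.length = y.toNat → 2 ≤ y → s ≤ total →
    2 * y - 2 ≤ s →
    PySem.List.pyGet? lambs (y - 2) = some a →
    PySem.List.pyGet? lambs (y - 1) = some b →
    fuel = (total + 1 - s).toNat →
    ((solLoop2 total lambs s y).length : Int) = fibLoop total a b s y ha hb := by
  intro fuel
  induction fuel using Nat.strong_induction_on with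
  | _ fuel ih =>
    intro lambs s y a b ha hb hlen hy hs hsy hga hgb hfuel
    have hyt : y ≤ total := by omega
    rw [solLoop2, dif_pos hyt, fibLoop, dif_pos hs]
    rw [hga, hgb]
    have hget_last : PySem.List.pyGet? (lambs ++ [b + a]) y = some (b + a) := by
      have h1 : y = ((lambs.length : Int)) := by omega
      rw [h1]
      exact PySem.List.pyGet?_append_length lambs [] (b + a)
    simp only [Option.getD_some, hget_last]
    by_cases hbrk : s + (b + a) > total
    · rw [if_pos hbrk, fibLoop, dif_neg (by omega)]
      simp; omega
    · rw [if_neg hbrk]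
      have hgb' : PySem.List.pyGet? (lambs ++ [b + a]) (y + 1 - 1) = some (b + a) := by
        have h1 : y + 1 - 1 = ((lambs.length : Int)) := by omega
        rw [h1]
        exact PySem.List.pyGet?_append_length lambs [] (b + a)
      have hga' : PySem.List.pyGet? (lambs ++ [b + a]) (y + 1 - 2) = some b := by
        have h1 : y + 1 - 2 = y - 1 := by ring
        rw [h1, PySem.List.pyGet?_of_nonneg (lambs ++ [b + a]) (by omega),
            List.getElem?_append_left (by omega)]
        rw [PySem.List.pyGet?_of_nonneg lambs (by omega)] at hgb
        exact hgb
      have := ih ((total + 1 - (s + (b + a))).toNat) (by omega) (lambs ++ [b + a])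
        (s + (b + a)) (y + 1) b (a + b) hb (by omega)
        (by simp [hlen]; omega) (by omega) (by omega) (by omega)
        (by exact hga') (by rw [show b + a = a + b by ring] at hgb' ⊢; exact hgb') rfl
      rw [show b + a = a + b by ring] at this ⊢
      exact this

-- ===== VERDICT (by name: the statement is the Claim_ definition above) =====
theorem solution_spec : Claim_equal_solution := by
  intro total _
  unfold Spec_solution solution solution_alt
  have hmax : ((solLoop1 total [] 0 0).length : Int)
      = if total < 0 then 0 else bitLen (total + 1) := by
    by_cases hneg : total < 0
    · rw [if_pos hneg, solLoop1, dif_neg (by omega)]; simp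
    · rw [if_neg hneg]
      have := solLoop1_len total ((total + 1 - 0).toNat) [] 0 (by omega)
        (by norm_num; omega) rfl
      norm_num at this ⊢
      omega
  have hfib : ((solLoop2 total [1, 1] 2 2).length : Int)
      = fibLoop total 1 1 2 2 (by omega) (by omega) := by
    by_cases hlt : total < 2
    · rw [solLoop2, dif_neg (by omega), fibLoop, dif_neg (by omega)]; simp
    · exact solLoop2_len total ((total + 1 - 2).toNat) [1, 1] 2 2 1 1 (by omega)
        (by omega) (by simp) (by omega) (by omega) (by omega) (by decide) (by decide) rfl
  simp only [hmax, hfib]
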